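-- pv_equiv track=rewrite | github.com/opendp/prelim | python/stat_hierarchical_histogram.py | _topological_neighbors
-- ===== SOURCE A (Python) =====
-- def _topological_neighbors(hierarchy):
--     import itertools
--
--     dag = {axes: [] for axes in hierarchy}
--
--     def descendants(v):
--         output = list(dag[v])
--         for c in dag[v]:
--             output.extend(descendants(c))
--         return output
--
--     for parent, child in itertools.permutations(hierarchy, 2):
--         if set(parent).issubset(child) and child not in descendants(parent):
--             dag[parent].append(child)
--
--     edges = []
--     for v in dag:
--         edges.extend([(v, c) for c in dag[v]])
--
--     return edges
-- ===== SOURCE B (Python) =====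
-- def _topological_neighbors(hierarchy):
--     import itertools
--
--     n = len(hierarchy)
--     adj = {axes: [] for axes in hierarchy}
--
--     def reachable(v):
--         # breadth-expansion to a fixpoint (at most n rounds are ever needed)
--         reach = set(adj[v])
--         for _ in range(n):
--             nxt = reach | {c for r in reach for c in adj[r]}
--             if nxt == reach:
--                 break
--             reach = nxt
--         return reach
--
--     for parent, child in itertools.permutations(hierarchy, 2):
--         if set(parent).issubset(child) and child not in reachable(parent):
--             adj[parent].append(child)
--
--     return [(v, c) for v in adj for c in adj[v]]
-- ===== Notes on version B (the rewrite author's own statement) =====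
-- stated objective: alternative
-- what changed: A decides 'child already a descendant' by recursively materialising the list of all paths below the parent; B keeps the same permutation order and edge rule but computes the reachable set by breadth-expansion with set union to a fixpoint.
import Mathlib
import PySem

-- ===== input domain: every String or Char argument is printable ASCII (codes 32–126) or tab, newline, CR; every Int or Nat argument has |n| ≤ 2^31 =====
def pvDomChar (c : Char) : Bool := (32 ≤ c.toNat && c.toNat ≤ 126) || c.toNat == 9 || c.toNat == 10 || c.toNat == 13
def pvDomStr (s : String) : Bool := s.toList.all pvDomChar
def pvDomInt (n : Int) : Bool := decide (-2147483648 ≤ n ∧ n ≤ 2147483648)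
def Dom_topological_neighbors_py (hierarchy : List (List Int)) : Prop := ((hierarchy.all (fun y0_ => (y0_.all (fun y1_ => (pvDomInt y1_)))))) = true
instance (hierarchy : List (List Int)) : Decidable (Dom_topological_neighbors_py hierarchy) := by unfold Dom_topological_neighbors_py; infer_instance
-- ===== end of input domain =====

-- B replaces A's all-paths `descendants` recursion by a breadth-expansion of a reachability
-- set to a fixpoint (same permutation order, same edge rule); objective: alternative.

-- shared transliteration of `itertools.permutations(hierarchy, 2)`:
-- pairs (hierarchy[i], hierarchy[j]) for all positions i ≠ j, i outer, j inner
def pvPairs (hierarchy : List (List Int)) : List (List Int × List Int) :=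
  (PySem.List.enumerate hierarchy).flatMap (fun ip =>
    ((PySem.List.enumerate hierarchy).filter (fun jc => jc.1 != ip.1)).map (fun jc => (ip.2, jc.2)))

-- set(p).issubset(c)
def pvSubset (p c : List Int) : Bool := p.all (fun x => c.contains x)

-- ===== PORT A =====
-- descendants(v): output = list(dag[v]); for c in dag[v]: output.extend(descendants(c)).
-- The fuel argument is only a totality guard (Python has none); hierarchy.length + 1 is
-- enough on every input admitted by Pre_ (paths in dag visit pairwise distinct keys).
def pvDescA (dag : PySem.Dict (List Int) (List (List Int))) : Nat → List Int → List (List Int)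
  | 0, _ => []
  | fuel+1, v =>
      (dag.getD v []).foldl (fun out c => out ++ pvDescA dag fuel c) (dag.getD v [])

def topological_neighbors_py (hierarchy : List (List Int)) : List (List Int × List Int) :=
  let dag0 : PySem.Dict (List Int) (List (List Int)) :=
    hierarchy.foldl (fun d a => d.insert a []) PySem.Dict.empty
  let dag := (pvPairs hierarchy).foldl (fun d pc =>
      if pvSubset pc.1 pc.2 && !((pvDescA d (hierarchy.length + 1) pc.1).contains pc.2)
      then d.insert pc.1 (d.getD pc.1 [] ++ [pc.2]) else d) dag0
  dag.items.foldl (fun es vcs => es ++ vcs.2.map (fun c => (vcs.1, c))) []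

-- ===== PORT B =====
-- one round: reach | {c for r in reach for c in adj[r]}
def pvExpand (adj : PySem.Dict (List Int) (List (List Int))) (reach : PySem.Set (List Int)) :
    PySem.Set (List Int) :=
  PySem.Set.union reach (reach.flatMap (fun r => adj.getD r []))

-- reachable(v)'s loop: `for _ in range(n)` with a break at the fixpoint
def pvReachB (adj : PySem.Dict (List Int) (List (List Int))) :
    Nat → PySem.Set (List Int) → PySem.Set (List Int)
  | 0, reach => reach
  | k+1, reach =>
      let nxt := pvExpand adj reach
      if PySem.Set.equal nxt reach then reach else pvReachB adj k nxt

def topological_neighbors_py_alt (hierarchy : List (List Int)) : List (List Int × List Int) :=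
  let n := hierarchy.length
  let adj0 : PySem.Dict (List Int) (List (List Int)) :=
    hierarchy.foldl (fun d a => d.insert a []) PySem.Dict.empty
  let adj := (pvPairs hierarchy).foldl (fun d pc =>
      if pvSubset pc.1 pc.2 &&
          !(PySem.Set.contains (pvReachB d n (PySem.Set.ofList (d.getD pc.1 []))) pc.2)
      then d.insert pc.1 (d.getD pc.1 [] ++ [pc.2]) else d) adj0
  adj.items.flatMap (fun vcs => vcs.2.map (fun c => (vcs.1, c)))

-- ===== PRECONDITION & SPEC =====
-- Pre_ excludes hierarchies containing two elements with equal underlying sets: on those the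
-- mutual-subset pair makes A's unbounded `descendants` recursion overflow (RecursionError)
-- whenever it is later invoked on a node reaching that cycle; on the few such inputs where A
-- happens to return, the cyclic edge pair it emits is an accident of the cycle.
def Pre_topological_neighbors_py (hierarchy : List (List Int)) : Prop :=
  List.Pairwise (fun a b => ¬(pvSubset a b = true ∧ pvSubset b a = true)) hierarchy
instance (hierarchy : List (List Int)) : Decidable (Pre_topological_neighbors_py hierarchy) := by
  unfold Pre_topological_neighbors_py; infer_instance

def pvWitness_topological_neighbors_py : List (List Int) := [[1], [1, 2], [3]]

def Spec_topological_neighbors_py (hierarchy : List (List Int)) (out : List (List Int × List Int)) : Prop := out = topological_neighbors_py_alt hierarchy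
instance (hierarchy : List (List Int)) (out : List (List Int × List Int)) : Decidable (Spec_topological_neighbors_py hierarchy out) := by unfold Spec_topological_neighbors_py; infer_instance

-- ===== CLAIM (what is proved, stated in full; the proofs are below) =====
def Claim_equal_topological_neighbors_py : Prop := ∀ (hierarchy : List (List Int)), Dom_topological_neighbors_py hierarchy → Pre_topological_neighbors_py hierarchy → Spec_topological_neighbors_py hierarchy (topological_neighbors_py hierarchy)

-- ===== LEMMAS AND PROOFS =====

-- `PvReach dag k v c`: c is reachable from v in dag along 1 … k edges
inductive PvReach (dag : PySem.Dict (List Int) (List (List Int))) : Nat → List Int → List Int → Prop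
  | base {k : Nat} {v c : List Int} : c ∈ dag.getD v [] → PvReach dag (k+1) v c
  | step {k : Nat} {v m c : List Int} : m ∈ dag.getD v [] → PvReach dag k m c → PvReach dag (k+1) v c

lemma pvReach_zero {dag : PySem.Dict (List Int) (List (List Int))} {v c : List Int} :
    ¬ PvReach dag 0 v c := fun h => by cases h

lemma pvReach_one_iff {dag : PySem.Dict (List Int) (List (List Int))} {v c : List Int} :
    PvReach dag 1 v c ↔ c ∈ dag.getD v [] := by
  constructor
  · intro h
    cases h with
    | base h => exact h
    | step hm h2 => exact absurd h2 pvReach_zero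
  · exact .base

lemma pvReach_mono {dag : PySem.Dict (List Int) (List (List Int))} {k : Nat} {v c : List Int}
    (h : PvReach dag k v c) : PvReach dag (k+1) v c := by
  induction h with
  | base h => exact .base h
  | step h _ ih => exact .step h ih

lemma pvReach_snoc {dag : PySem.Dict (List Int) (List (List Int))} {k : Nat} {v r c : List Int}
    (h : PvReach dag k v r) (hc : c ∈ dag.getD r []) : PvReach dag (k+1) v c := by
  induction h with
  | base h => exact .step h (.base hc)
  | step h _ ih => exact .step h (ih hc)

lemma pvReach_succ_iff {dag : PySem.Dict (List Int) (List (List Int))} {k : Nat} {v c : List Int} :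
    PvReach dag (k+2) v c ↔
      PvReach dag (k+1) v c ∨ ∃ r, PvReach dag (k+1) v r ∧ c ∈ dag.getD r [] := by
  constructor
  · intro h
    induction k generalizing v c with
    | zero =>
        cases h with
        | base h => exact .inl (.base h)
        | step hm h2 =>
            cases h2 with
            | base hc => exact .inr ⟨_, .base hm, hc⟩
            | step h3 h4 => exact absurd h4 pvReach_zero
    | succ k ih =>
        cases h with
        | base h => exact .inl (.base h)
        | step hm h2 =>
            rcases ih h2 with h3 | ⟨r, h3, hc⟩
            · exact .inl (.step hm h3)
            · exact .inr ⟨r, .step hm h3, hc⟩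
  · rintro (h | ⟨r, h, hc⟩)
    · exact pvReach_mono h
    · exact pvReach_snoc h hc

-- membership in A's fuelled descendants list = bounded reachability
lemma mem_pvDescA {dag : PySem.Dict (List Int) (List (List Int))} :
    ∀ {fuel : Nat} {v c : List Int}, c ∈ pvDescA dag fuel v ↔ PvReach dag fuel v c := by
  intro fuel
  induction fuel with
  | zero =>
      intro v c
      simp only [pvDescA, List.not_mem_nil, false_iff]
      exact pvReach_zero
  | succ f ih =>
      intro v c
      rw [show pvDescA dag (f+1) v =
            (dag.getD v []).foldl (fun out c => out ++ pvDescA dag f c) (dag.getD v []) from rfl,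
          PySem.List.foldl_append_eq_flatMap]
      simp only [List.mem_append, List.mem_flatMap, ih]
      constructor
      · rintro (h | ⟨m, hm, h⟩)
        · exact .base h
        · exact .step hm h
      · intro h
        cases h with
        | base h => exact .inl h
        | step hm h => exact .inr ⟨_, hm, h⟩

-- membership after one expansion round
lemma mem_pvExpand {adj : PySem.Dict (List Int) (List (List Int))}
    {s : PySem.Set (List Int)} {c : List Int} :
    c ∈ pvExpand adj s ↔ c ∈ s ∨ ∃ r ∈ s, c ∈ adj.getD r [] := by
  simp [pvExpand, PySem.Set.mem_union, List.mem_flatMap]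

-- a round that adds nothing new returns the set unchanged (literally)
lemma pvExpand_fixed {adj : PySem.Dict (List Int) (List (List Int))} {s : PySem.Set (List Int)}
    (h : PySem.Set.equal (pvExpand adj s) s = true) : pvExpand adj s = s := by
  have hmem := (PySem.Set.equal_iff _ _).mp h
  have hsub : ∀ x ∈ s.flatMap (fun r => adj.getD r []), x ∈ s := by
    intro x hx
    exact (hmem x).mp ((PySem.Set.mem_union _ _ _).mpr (.inr hx))
  show PySem.Set.union s (s.flatMap (fun r => adj.getD r [])) = s
  rw [show PySem.Set.union s (s.flatMap (fun r => adj.getD r [])) =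
        PySem.Set.update s (s.flatMap (fun r => adj.getD r [])) from rfl,
      PySem.Set.update_eq_append_filter]
  have : (PySem.Set.ofList (s.flatMap fun r => adj.getD r [])).filter
      (fun y => !(PySem.Set.contains s y)) = [] := by
    rw [List.filter_eq_nil_iff]
    intro x hx
    simpa using hsub x ((PySem.Set.mem_ofList _ _).mp hx)
  rw [this, List.append_nil]

-- the break in B's loop never changes the computed set
lemma pvReachB_eq_iterate {adj : PySem.Dict (List Int) (List (List Int))} :
    ∀ (k : Nat) (s : PySem.Set (List Int)), pvReachB adj k s = (pvExpand adj)^[k] s := by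
  intro k
  induction k with
  | zero => intro s; rfl
  | succ k ih =>
      intro s
      show (if PySem.Set.equal (pvExpand adj s) s then s else pvReachB adj k (pvExpand adj s)) = _
      split_ifs with h
      · rw [Function.iterate_fixed (pvExpand_fixed h)]
      · rw [ih, ← Function.iterate_succ_apply]

-- membership after k expansion rounds = reachability within k+1 edges
lemma mem_iterate_pvExpand {adj : PySem.Dict (List Int) (List (List Int))} :
    ∀ (k : Nat) (v c : List Int),
      c ∈ (pvExpand adj)^[k] (PySem.Set.ofList (adj.getD v [])) ↔ PvReach adj (k+1) v c := by
  intro k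
  induction k with
  | zero =>
      intro v c
      simpa [PySem.Set.mem_ofList] using pvReach_one_iff.symm
  | succ k ih =>
      intro v c
      rw [Function.iterate_succ_apply', mem_pvExpand, pvReach_succ_iff]
      constructor
      · rintro (h | ⟨r, hr, hc⟩)
        · exact .inl ((ih v c).mp h)
        · exact .inr ⟨r, (ih v r).mp hr, hc⟩
      · rintro (h | ⟨r, hr, hc⟩)
        · exact .inl ((ih v c).mpr h)
        · exact .inr ⟨r, (ih v r).mpr hr, hc⟩

-- the two membership tests agree on every dict state
lemma pvContains_eq (d : PySem.Dict (List Int) (List (List Int))) (n : Nat) (p c : List Int) :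
    (pvDescA d (n+1) p).contains c =
      PySem.Set.contains (pvReachB d n (PySem.Set.ofList (d.getD p []))) c := by
  rw [Bool.eq_iff_iff]
  rw [List.contains_iff_mem, mem_pvDescA, PySem.Set.contains_iff, pvReachB_eq_iterate,
      mem_iterate_pvExpand]

-- ===== VERDICT (by name: the statement is the Claim_ definition above) =====
theorem topological_neighbors_py_spec : Claim_equal_topological_neighbors_py := by
  intro hierarchy _ _
  unfold Spec_topological_neighbors_py topological_neighbors_py topological_neighbors_py_alt
  have hstep :
      (fun (d : PySem.Dict (List Int) (List (List Int))) (pc : List Int × List Int) =>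
        if pvSubset pc.1 pc.2 && !((pvDescA d (hierarchy.length + 1) pc.1).contains pc.2)
        then d.insert pc.1 (d.getD pc.1 [] ++ [pc.2]) else d) =
      (fun (d : PySem.Dict (List Int) (List (List Int))) (pc : List Int × List Int) =>
        if pvSubset pc.1 pc.2 &&
            !(PySem.Set.contains (pvReachB d hierarchy.length
                (PySem.Set.ofList (d.getD pc.1 []))) pc.2)
        then d.insert pc.1 (d.getD pc.1 [] ++ [pc.2]) else d) := by
    funext d pc
    rw [pvContains_eq]
  simp only [hstep]
  rw [PySem.List.foldl_append_eq_flatMap, List.nil_append]
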